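-- pv_equiv track=rewrite | github.com/pda66699-boop/bot | bot/business_language_adapter.py | _dominant_letter
-- ===== SOURCE A (Python) =====
-- def _dominant_letter(paei: dict[str, int]) -> str | None:
--     values = {letter: int(paei.get(letter, 0)) for letter in ("P", "A", "E", "I")}
--     sorted_values = sorted(values.items(), key=lambda item: item[1], reverse=True)
--     top1 = sorted_values[0]
--     top2 = sorted_values[1]
--     if top1[1] - top2[1] >= 5:
--         return top1[0]
--     return None
-- ===== SOURCE B (Python) =====
-- def _dominant_letter(paei):
--     best_letter, best, second = None, None, None
--     for letter in ("P", "A", "E", "I"):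
--         v = int(paei.get(letter, 0))
--         if best is None or v > best:
--             best_letter, best, second = letter, v, best
--         elif second is None or v > second:
--             second = v
--     return best_letter if best - second >= 5 else None
-- ===== Notes on version B (the rewrite author's own statement) =====
-- stated objective: alternative
-- what changed: Replaces building a dict of the four values and stably sorting its items descending by a single pass over the four letters that tracks (best letter, best value, runner-up value) in an accumulator, with no dict, sort or indexing.
import Mathlib
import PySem

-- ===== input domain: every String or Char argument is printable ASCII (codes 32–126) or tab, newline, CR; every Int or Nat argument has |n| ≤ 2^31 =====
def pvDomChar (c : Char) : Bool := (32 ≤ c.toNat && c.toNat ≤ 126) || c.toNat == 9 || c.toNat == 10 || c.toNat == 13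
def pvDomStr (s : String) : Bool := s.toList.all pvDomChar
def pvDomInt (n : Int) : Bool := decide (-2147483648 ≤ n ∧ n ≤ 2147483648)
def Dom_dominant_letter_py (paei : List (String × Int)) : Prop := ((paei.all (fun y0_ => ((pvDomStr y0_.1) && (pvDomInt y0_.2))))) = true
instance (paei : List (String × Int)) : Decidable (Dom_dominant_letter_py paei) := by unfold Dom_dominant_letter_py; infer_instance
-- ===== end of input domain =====

-- B replaces A's dict-of-values + full stable descending sort by one accumulator pass over
-- the four letters tracking (best letter, best value, runner-up value) (objective: alternative).

-- ===== PORT A =====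
-- The dict comprehension produces four distinct keys in order P,A,E,I; its items list is
-- transcribed directly as that list of pairs (exact: keys are distinct literals).
def dominant_letter_py (paei : List (String × Int)) : Option String :=
  let g : String → Int := fun l => (PySem.Dict.mk paei).getD l 0
  let values : List (String × Int) := [("P", g "P"), ("A", g "A"), ("E", g "E"), ("I", g "I")]
  let sorted_values := PySem.List.sorted values (fun item => item.2) true
  -- sorted_values[0] / sorted_values[1] always exist (values has 4 entries); the
  -- unreachable short-list arm returns none.
  match sorted_values with
  | top1 :: top2 :: _ => if top1.2 - top2.2 ≥ 5 then some top1.1 else none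
  | _ => none

-- ===== PORT B =====
-- One fold over the tuple of letters, state = (best_letter, best, second), exactly Source B's loop.
def pvStepB (paei : List (String × Int))
    (st : Option String × Option Int × Option Int) (letter : String) :
    Option String × Option Int × Option Int :=
  let v : Int := (PySem.Dict.mk paei).getD letter 0
  match st with
  | (_, none, _) => (some letter, some v, st.2.1)
  | (bl, some b, sec) =>
    if v > b then (some letter, some v, some b)
    else match sec with
      | none => (bl, some b, some v)
      | some s => if v > s then (bl, some b, some v) else (bl, some b, some s)

def dominant_letter_py_alt (paei : List (String × Int)) : Option String :=
  match ["P", "A", "E", "I"].foldl (pvStepB paei) (none, none, none) with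
  | (some bl, some b, some s) => if b - s ≥ 5 then some bl else none
  | _ => none

-- ===== PRECONDITION & SPEC =====
def Spec_dominant_letter_py (paei : List (String × Int)) (out : Option String) : Prop := out = dominant_letter_py_alt paei
instance (paei : List (String × Int)) (out : Option String) : Decidable (Spec_dominant_letter_py paei out) := by unfold Spec_dominant_letter_py; infer_instance

-- ===== CLAIM (what is proved, stated in full; the proofs are below) =====
def Claim_equal_dominant_letter_py : Prop := ∀ (paei : List (String × Int)), Dom_dominant_letter_py paei → Spec_dominant_letter_py paei (dominant_letter_py paei)

-- ===== LEMMAS AND PROOFS =====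

-- Core fact: for any four values p,a,e,i, A's sort-based head/runner-up test equals B's
-- single-pass best/second tracker.
theorem pv_core (paei : List (String × Int))
    (hp : (PySem.Dict.mk paei).getD "P" 0 = p) (ha : (PySem.Dict.mk paei).getD "A" 0 = a)
    (he : (PySem.Dict.mk paei).getD "E" 0 = e) (hi : (PySem.Dict.mk paei).getD "I" 0 = i) :
    dominant_letter_py paei = dominant_letter_py_alt paei := by
  unfold dominant_letter_py dominant_letter_py_alt
  simp only [List.foldl, pvStepB, hp, ha, he, hi,
    PySem.List.sorted, PySem.List.insertBy]
  repeat' (first | omega | rfl | (split_ifs <;> simp_all [PySem.List.insertBy]))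

-- ===== VERDICT (by name: the statement is the Claim_ definition above) =====
theorem dominant_letter_py_spec : Claim_equal_dominant_letter_py := by
  intro paei _
  unfold Spec_dominant_letter_py
  exact pv_core paei rfl rfl rfl rfl
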